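-- pv_equiv track=rewrite | github.com/wcy666687/Sound-Source-Separation-based-on-Visual-and-Auditory-information | data_create.py | calculate
-- ===== SOURCE A (Python) =====
-- def calculate(list1):
--     #统计聚类后的列数,用于0,1序列
--     L1 = len(list1)  # 列表list1的长度
--     list2 = list(set(list1))  # 可以用set，直接去掉重复的元素
--     list2.sort(reverse=False)  # 将列表由小到大排序
--     x=[]
--     for m in range(2):
--         X = set()  # 设定一个空的集合，用来存放这个元素的所在的位置
--         start = list1.index(list2[m])
--         for n in range(L1):
--             stop = L1
--             if list2[m] in tuple(list1)[start:stop]: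
--                 a = list1.index(list2[m], start, stop)
--                 X.add(a)
--                 start = start + 1
--         x.append(X)
--     return x
-- ===== SOURCE B (Python) =====
-- def calculate(list1):
--     m1 = min(list1)
--     m2 = min(v for v in list1 if v != m1)
--     return [{i for i, v in enumerate(list1) if v == m1},
--             {i for i, v in enumerate(list1) if v == m2}]
-- ===== Notes on version B (the rewrite author's own statement) =====
-- stated objective: faster
-- what changed: replaces the sorted-distinct list plus a quadratic loop of repeated slice-membership tests and list.index scans by two linear min computations and one linear index-collecting comprehension per value
import Mathlib
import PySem

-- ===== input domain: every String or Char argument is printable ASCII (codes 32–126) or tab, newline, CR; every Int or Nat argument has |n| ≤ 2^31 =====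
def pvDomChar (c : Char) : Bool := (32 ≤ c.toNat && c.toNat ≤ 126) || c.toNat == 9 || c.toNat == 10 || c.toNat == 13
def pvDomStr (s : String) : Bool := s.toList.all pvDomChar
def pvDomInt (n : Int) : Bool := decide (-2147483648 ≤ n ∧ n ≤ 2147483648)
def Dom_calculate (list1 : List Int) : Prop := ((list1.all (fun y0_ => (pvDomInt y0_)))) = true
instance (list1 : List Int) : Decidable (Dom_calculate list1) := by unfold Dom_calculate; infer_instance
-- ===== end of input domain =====

-- B replaces A's quadratic repeated slice-membership/index scans by two linear min computations
-- and one linear index-collecting comprehension per value (objective: faster).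

-- ===== PORT A =====
def calculate (list1 : List Int) : List (List Int) :=
  let L1 : Nat := list1.length
  let list2 : List Int := PySem.List.sorted (PySem.Set.ofList list1) (fun x => x) false
  (PySem.List.pyRange 0 2 1).foldl (fun x m =>
    let v : Int := PySem.List.pyGetD list2 m 0          -- list2[m]; in range under Pre_
    let start0 : Int := (((PySem.List.index? list1 v).getD 0 : Nat) : Int)  -- v ∈ list1 under Pre_
    let r := (PySem.List.pyRange 0 (L1 : Int) 1).foldl (fun (st : List Int × Int) _n =>
        let X := st.1
        let start := st.2
        let stop : Int := (L1 : Int)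
        if v ∈ PySem.List.slice list1 (some start) (some stop) then
          let a : Int := start + (((PySem.List.index? (PySem.List.slice list1 (some start) (some stop)) v).getD 0 : Nat) : Int)
          (PySem.Set.add X a, start + 1)
        else (X, start)) (PySem.Set.empty, start0)
    x ++ [r.1]) []

-- ===== PORT B =====
def calculate_alt (list1 : List Int) : List (List Int) :=
  let m1 : Int := (PySem.List.min? list1 (fun x => x)).getD 0                              -- min(list1); nonempty under Pre_
  let m2 : Int := (PySem.List.min? (list1.filter (fun v => v ≠ m1)) (fun x => x)).getD 0   -- min of the other values; nonempty under Pre_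
  [PySem.Set.ofList ((PySem.List.enumerate list1 0).filterMap (fun p => if p.2 = m1 then some p.1 else none)),
   PySem.Set.ofList ((PySem.List.enumerate list1 0).filterMap (fun p => if p.2 = m2 then some p.1 else none))]

-- ===== PRECONDITION & SPEC =====
-- A raises IndexError (list2[1]) when list1 has fewer than two distinct values; B raises there too
-- (ValueError from min on an empty list/generator): Pre_ admits exactly the inputs where A returns.
def Pre_calculate (list1 : List Int) : Prop := 2 ≤ (PySem.Set.ofList list1).length
instance (list1 : List Int) : Decidable (Pre_calculate list1) := by unfold Pre_calculate; infer_instance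
def pvWitness_calculate : List Int := [3, 1, 2, 1]

def Spec_calculate (list1 : List Int) (out : List (List Int)) : Prop := out = calculate_alt list1
instance (list1 : List Int) (out : List (List Int)) : Decidable (Spec_calculate list1 out) := by unfold Spec_calculate; infer_instance

-- ===== CLAIM (what is proved, stated in full; the proofs are below) =====
def Claim_equal_calculate : Prop := ∀ (list1 : List Int), Dom_calculate list1 → Pre_calculate list1 → Spec_calculate list1 (calculate list1)

-- ===== LEMMAS AND PROOFS =====

-- occAux l v s = the indices (absolute, counting from s) of the occurrences of v in l, in increasing order
def occAux (l : List Int) (v : Int) (s : Nat) : List Int :=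
  match l with
  | [] => []
  | a :: t => if a = v then ((s : Nat) : Int) :: occAux t v (s + 1) else occAux t v (s + 1)

-- the body of A's inner loop, as a function of the state
def stepA (xs : List Int) (v : Int) (st : List Int × Int) : List Int × Int :=
  let X := st.1
  let start := st.2
  let stop : Int := (xs.length : Int)
  if v ∈ PySem.List.slice xs (some start) (some stop) then
    let a : Int := start + (((PySem.List.index? (PySem.List.slice xs (some start) (some stop)) v).getD 0 : Nat) : Int)
    (PySem.Set.add X a, start + 1)
  else (X, start)

theorem foldl_const {α β : Type} (g : β → β) (l : List α) (init : β) :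
    List.foldl (fun st _ => g st) init l = g^[l.length] init := by
  induction l generalizing init with
  | nil => rfl
  | cons a l ih => simp [List.foldl_cons, ih, Function.iterate_succ_apply]

theorem slice_to_len (xs : List Int) (s : Nat) :
    PySem.List.slice xs (some (s : Int)) (some (xs.length : Int)) = xs.drop s := by
  rw [PySem.List.slice_natCast]
  exact List.take_of_length_le (by simp)

theorem occAux_of_not_mem {l : List Int} {v : Int} (h : v ∉ l) (s : Nat) : occAux l v s = [] := by
  induction l generalizing s with
  | nil => rfl
  | cons a t ih =>
    simp only [List.mem_cons, not_or] at h
    have ha : ¬ a = v := fun hh => h.1 hh.symm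
    simp [occAux, ha, ih h.2]

theorem occAux_append (l₁ l₂ : List Int) (v : Int) (s : Nat) :
    occAux (l₁ ++ l₂) v s = occAux l₁ v s ++ occAux l₂ v (s + l₁.length) := by
  induction l₁ generalizing s with
  | nil => simp [occAux]
  | cons a t ih =>
    by_cases h : a = v <;>
      simp [occAux, h, ih, Nat.add_assoc, Nat.add_comm 1 t.length]

theorem occAux_head {l : List Int} {v : Int} (h : v ∈ l) (s : Nat) :
    ∃ R, occAux l v s = ((s + (PySem.List.index? l v).getD 0 : Nat) : Int) :: R := by
  induction l generalizing s with
  | nil => cases h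
  | cons a t ih =>
    by_cases ha : a = v
    · subst ha
      refine ⟨occAux t a (s + 1), ?_⟩
      rw [PySem.List.index?_cons_self]
      simp [occAux]
    · have hvt : v ∈ t := by
        rcases List.mem_cons.mp h with h' | h'
        · exact absurd h'.symm ha
        · exact h'
      obtain ⟨R, hR⟩ := ih hvt (s + 1)
      obtain ⟨j, hj⟩ := Option.isSome_iff_exists.mp ((PySem.List.index?_isSome_iff t v).mpr hvt)
      refine ⟨R, ?_⟩
      rw [PySem.List.index?_cons_of_ne t ha, hj]
      rw [hj, Option.getD_some] at hR
      simp only [occAux, if_neg ha, Option.map_some, Option.getD_some]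
      rw [hR]
      congr 1
      omega

theorem pvAddIdem {s : List Int} {x : Int} :
    PySem.Set.add (PySem.Set.add s x) x = PySem.Set.add s x := by
  by_cases h : x ∈ s <;> simp [PySem.Set.add, h]

theorem step_stays {xs : List Int} {v : Int} {s : Nat} (h : v ∉ xs.drop s) :
    ∀ (k : Nat) (X : List Int), (stepA xs v)^[k] (X, (s : Int)) = (X, (s : Int)) := by
  intro k
  induction k with
  | zero => intro X; rfl
  | succ k ih =>
    intro X
    rw [Function.iterate_succ_apply]
    have : stepA xs v (X, (s : Int)) = (X, (s : Int)) := by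
      simp [stepA, slice_to_len, h]
    rw [this, ih]

theorem iter_spec (xs : List Int) (v : Int) :
    ∀ (k s : Nat) (X : List Int), xs.length ≤ s + k →
      ((stepA xs v)^[k] (X, (s : Int))).1 = PySem.Set.update X (occAux (xs.drop s) v s) := by
  intro k
  induction k with
  | zero =>
    intro s X h
    rw [List.drop_eq_nil_of_le (by omega)]
    simp [occAux, PySem.Set.update]
  | succ k ih =>
    intro s X h
    by_cases hmem : v ∈ xs.drop s
    · -- the slice is nonempty and contains v: one index is added, start moves on
      obtain ⟨j, hj⟩ := Option.isSome_iff_exists.mp ((PySem.List.index?_isSome_iff (xs.drop s) v).mpr hmem)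
      rw [Function.iterate_succ_apply]
      have hstep : stepA xs v (X, (s : Int)) =
          (PySem.Set.add X ((s + j : Nat) : Int), ((s + 1 : Nat) : Int)) := by
        simp only [stepA, slice_to_len, hj, Option.getD_some]
        rw [if_pos hmem]
        push_cast
        rfl
      rw [hstep, ih (s + 1) _ (by omega)]
      obtain ⟨b, t, hd⟩ := List.exists_cons_of_ne_nil (List.ne_nil_of_mem hmem)
      have ht : xs.drop (s + 1) = t := by rw [← List.tail_drop, hd]; rfl
      by_cases hb : b = v
      · -- the occurrence is at s itself
        have hj0 : j = 0 := by
          rw [hd, hb, PySem.List.index?_cons_self] at hj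
          exact Option.some_inj.mp hj.symm
        rw [ht, hd]
        subst hb
        simp [occAux, hj0, PySem.Set.update_cons]
      · -- first occurrence lies further right: it is also the head of occAux at s+1
        have hvt : v ∈ t := by
          rw [hd] at hmem
          rcases List.mem_cons.mp hmem with h' | h'
          · exact absurd h'.symm hb
          · exact h'
        obtain ⟨j', hj'⟩ := Option.isSome_iff_exists.mp ((PySem.List.index?_isSome_iff t v).mpr hvt)
        obtain ⟨R, hR⟩ := occAux_head hvt (s + 1)
        have hjj : j = j' + 1 := by
          rw [hd, PySem.List.index?_cons_of_ne t hb, hj'] at hj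
          simpa using hj.symm
        have hhead : occAux t v (s + 1) = ((s + j : Nat) : Int) :: R := by
          rw [hR, hj', Option.getD_some]
          congr 2
          omega
        have hocc2 : occAux (b :: t) v s = occAux t v (s + 1) := by
          simp [occAux, hb]
        rw [ht, hd, hocc2, hhead, PySem.Set.update_cons, PySem.Set.update_cons, pvAddIdem]
    · -- no occurrence at or after start: the loop never fires again
      rw [Function.iterate_succ_apply]
      have hfix : stepA xs v (X, (s : Int)) = (X, (s : Int)) := by
        simp [stepA, slice_to_len, hmem]
      rw [hfix, step_stays hmem, occAux_of_not_mem hmem]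
      simp [PySem.Set.update]

-- every element of occAux l v s is ≥ s, hence occAux is strictly increasing and Nodup
theorem occAux_ge (l : List Int) (v : Int) (s : Nat) :
    ∀ y ∈ occAux l v s, (s : Int) ≤ y := by
  induction l generalizing s with
  | nil => intro y hy; cases hy
  | cons a t ih =>
    intro y hy
    by_cases ha : a = v
    · simp only [occAux, ha, if_pos] at hy
      rcases List.mem_cons.mp hy with h' | h'
      · omega
      · have := ih (s + 1) y h'; push_cast at this ⊢; omega
    · simp only [occAux, ha, if_false] at hy
      have := ih (s + 1) y hy; push_cast at this ⊢; omega

theorem occAux_nodup (l : List Int) (v : Int) (s : Nat) : (occAux l v s).Nodup := by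
  induction l generalizing s with
  | nil => exact List.nodup_nil
  | cons a t ih =>
    by_cases ha : a = v
    · simp only [occAux, ha, if_pos]
      refine List.nodup_cons.mpr ⟨?_, ih (s + 1)⟩
      intro hmem
      have := occAux_ge t v (s + 1) _ hmem
      push_cast at this; omega
    · simp only [occAux, ha, if_false]; exact ih (s + 1)

-- A's inner loop, started at the first index of v with fuel len(xs), collects exactly the occurrence list
theorem inner_loop_eq (xs : List Int) (v : Int) (hv : v ∈ xs) :
    ((PySem.List.pyRange 0 (xs.length : Int) 1).foldl (fun (st : List Int × Int) _n =>
        let X := st.1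
        let start := st.2
        let stop : Int := (xs.length : Int)
        if v ∈ PySem.List.slice xs (some start) (some stop) then
          let a : Int := start + (((PySem.List.index? (PySem.List.slice xs (some start) (some stop)) v).getD 0 : Nat) : Int)
          (PySem.Set.add X a, start + 1)
        else (X, start))
      (PySem.Set.empty, (((PySem.List.index? xs v).getD 0 : Nat) : Int))).1
    = occAux xs v 0 := by
  obtain ⟨s₀, hs₀⟩ := Option.isSome_iff_exists.mp ((PySem.List.index?_isSome_iff xs v).mpr hv)
  obtain ⟨hlt, hval, hfirst⟩ := PySem.List.getElem_of_index?_eq_some hs₀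
  have hfold : (PySem.List.pyRange 0 (xs.length : Int) 1).foldl (fun (st : List Int × Int) _n => stepA xs v st)
      (PySem.Set.empty, ((s₀ : Nat) : Int)) = (stepA xs v)^[xs.length] (PySem.Set.empty, ((s₀ : Nat) : Int)) := by
    rw [foldl_const]
    have : (PySem.List.pyRange 0 (xs.length : Int) 1).length = xs.length := by
      simp [PySem.List.length_pyRange_one]
    rw [this]
  have hmain := iter_spec xs v xs.length s₀ PySem.Set.empty (by omega)
  -- skipping the prefix before the first occurrence changes nothing
  have hpre : occAux (xs.drop s₀) v s₀ = occAux xs v 0 := by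
    have hsplit : xs = xs.take s₀ ++ xs.drop s₀ := (List.take_append_drop s₀ xs).symm
    have hnot : v ∉ xs.take s₀ := by
      intro hmem
      obtain ⟨j, hjlt, hjval⟩ := List.mem_iff_getElem.mp hmem
      have hjlen : j < s₀ := lt_of_lt_of_le hjlt (by simp)
      have : xs[j]'(by omega) = v := by
        rw [← hjval]; exact (List.getElem_take).symm
      exact hfirst j hjlen this
    conv_rhs => rw [hsplit]
    rw [occAux_append, occAux_of_not_mem hnot, List.length_take_of_le (le_of_lt hlt)]
    simp
  calc ((PySem.List.pyRange 0 (xs.length : Int) 1).foldl (fun st _n => stepA xs v st)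
          (PySem.Set.empty, (((PySem.List.index? xs v).getD 0 : Nat) : Int))).1
      = ((stepA xs v)^[xs.length] (PySem.Set.empty, ((s₀ : Nat) : Int))).1 := by
        rw [hs₀]; simp only [Option.getD_some]; rw [hfold]
    _ = PySem.Set.update PySem.Set.empty (occAux (xs.drop s₀) v s₀) := hmain
    _ = occAux xs v 0 := by
        rw [hpre]
        have hofl : PySem.Set.update PySem.Set.empty (occAux xs v 0) = PySem.Set.ofList (occAux xs v 0) :=
          PySem.Set.update_nil_left _
        rw [hofl, PySem.Set.ofList_eq_self_of_nodup _ (occAux_nodup xs v 0)]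


-- B's comprehension computes the same occurrence list
theorem filterMap_enumerate_eq (xs : List Int) (v : Int) :
    ∀ s : Nat, (PySem.List.enumerate xs (s : Int)).filterMap
        (fun p => if p.2 = v then some p.1 else none) = occAux xs v s := by
  induction xs with
  | nil => intro s; simp [PySem.List.enumerate_nil, occAux]
  | cons a t ih =>
    intro s
    have hcast : ((s : Int) + 1) = ((s + 1 : Nat) : Int) := by push_cast; ring
    rw [PySem.List.enumerate_cons, hcast, List.filterMap_cons, ih (s + 1)]
    by_cases ha : a = v
    · simp [occAux, ha]
    · simp [occAux, ha]

-- the two smallest distinct values: heads of the sorted dedup list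
theorem min_eq_head {xs : List Int} {c0 : Int} {t : List Int}
    (hs : PySem.List.sorted (PySem.Set.ofList xs) (fun x => x) false = c0 :: t) :
    (PySem.List.min? xs (fun x => x)).getD 0 = c0 := by
  have hc0mem : c0 ∈ xs := by
    have : c0 ∈ PySem.List.sorted (PySem.Set.ofList xs) (fun x => x) false := by rw [hs]; simp
    exact (PySem.Set.mem_ofList xs c0).mp ((PySem.List.mem_sorted _ _ _ _).mp this)
  have hne : xs ≠ [] := List.ne_nil_of_mem hc0mem
  have hsome : (PySem.List.min? xs (fun x : Int => x)).isSome = true := by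
    rw [Option.isSome_iff_ne_none]
    intro hnone
    exact hne ((PySem.List.min?_eq_none_iff xs (fun x : Int => x)).mp hnone)
  obtain ⟨m, hm⟩ := Option.isSome_iff_exists.mp hsome
  have hmmem : m ∈ xs := PySem.List.min?_mem hm
  have hmin : ∀ y ∈ xs, m ≤ y := fun y hy => PySem.List.min?_isMin hm y hy
  have hle : c0 ≤ m := by
    exact PySem.List.key_head_sorted_le _ _ hs m ((PySem.Set.mem_ofList xs m).mpr hmmem)
  rw [hm]
  simp only [Option.getD_some]
  exact le_antisymm (hmin c0 hc0mem) hle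

theorem min2_eq_second {xs : List Int} {c0 c1 : Int} {t : List Int}
    (hs : PySem.List.sorted (PySem.Set.ofList xs) (fun x => x) false = c0 :: c1 :: t) :
    (PySem.List.min? (xs.filter (fun v => v ≠ c0)) (fun x => x)).getD 0 = c1 := by
  have hpair := PySem.List.sorted_ofList_pairwise_lt xs
  rw [hs] at hpair
  have hc0c1 : c0 < c1 := (List.pairwise_cons.mp hpair).1 c1 (by simp)
  have hc1rest : ∀ y ∈ t, c1 < y := (List.pairwise_cons.mp (List.pairwise_cons.mp hpair).2).1
  have hc1mem : c1 ∈ xs := by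
    have : c1 ∈ PySem.List.sorted (PySem.Set.ofList xs) (fun x => x) false := by rw [hs]; simp
    exact (PySem.Set.mem_ofList xs c1).mp ((PySem.List.mem_sorted _ _ _ _).mp this)
  have hc1f : c1 ∈ xs.filter (fun v => v ≠ c0) := by
    refine List.mem_filter.mpr ⟨hc1mem, ?_⟩
    simp only [decide_eq_true_eq]
    omega
  have hsome : (PySem.List.min? (xs.filter (fun v => v ≠ c0)) (fun x : Int => x)).isSome = true := by
    rw [Option.isSome_iff_ne_none]
    intro hnone
    exact (List.ne_nil_of_mem hc1f)
      ((PySem.List.min?_eq_none_iff (xs.filter (fun v => v ≠ c0)) (fun x : Int => x)).mp hnone)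
  obtain ⟨m, hm⟩ := Option.isSome_iff_exists.mp hsome
  have hmf := PySem.List.min?_mem hm
  have hmxs : m ∈ xs := (List.mem_filter.mp hmf).1
  have hmne : m ≠ c0 := by
    have := (List.mem_filter.mp hmf).2; simpa using this
  have hmin : ∀ y ∈ xs.filter (fun v => v ≠ c0), m ≤ y := fun y hy => PySem.List.min?_isMin hm y hy
  have hmlist : m ∈ c0 :: c1 :: t := by
    rw [← hs]
    exact (PySem.List.mem_sorted _ _ _ _).mpr ((PySem.Set.mem_ofList xs m).mpr hmxs)
  have hc1m : c1 ≤ m := by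
    rcases List.mem_cons.mp hmlist with h' | h'
    · exact absurd h' hmne
    rcases List.mem_cons.mp h' with h'' | h''
    · omega
    · exact le_of_lt (hc1rest m h'')
  rw [hm]
  simp only [Option.getD_some]
  exact le_antisymm (hmin c1 hc1f) hc1m

-- ===== VERDICT (by name: the statement is the Claim_ definition above) =====
theorem calculate_spec : Claim_equal_calculate := by
  intro xs _hdom hpre
  unfold Spec_calculate
  dsimp only [calculate, calculate_alt]
  unfold Pre_calculate at hpre
  -- the sorted distinct list has at least two elements
  have hlen : 2 ≤ (PySem.List.sorted (PySem.Set.ofList xs) (fun x => x) false).length := by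
    rw [PySem.List.length_sorted]; exact hpre
  rcases hL : PySem.List.sorted (PySem.Set.ofList xs) (fun x => x) false with _ | ⟨c0, l'⟩
  · rw [hL] at hlen; simp at hlen
  rcases hL' : l' with _ | ⟨c1, rest⟩
  · rw [hL, hL'] at hlen; simp at hlen
  rw [hL'] at hL
  have hc0mem : c0 ∈ xs := by
    have : c0 ∈ PySem.List.sorted (PySem.Set.ofList xs) (fun x => x) false := by rw [hL]; simp
    exact (PySem.Set.mem_ofList xs c0).mp ((PySem.List.mem_sorted _ _ _ _).mp this)
  have hc1mem : c1 ∈ xs := by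
    have : c1 ∈ PySem.List.sorted (PySem.Set.ofList xs) (fun x => x) false := by rw [hL]; simp
    exact (PySem.Set.mem_ofList xs c1).mp ((PySem.List.mem_sorted _ _ _ _).mp this)
  -- unroll the outer loop: range(2) = [0, 1]
  have hrange2 : PySem.List.pyRange 0 2 1 = [0, 1] := by decide
  rw [hrange2]
  simp only [List.foldl_cons, List.foldl_nil, List.nil_append]
  have hget0 : PySem.List.pyGetD (c0 :: c1 :: rest) 0 0 = c0 := by
    simp [PySem.List.pyGetD_ofNat']
  have hget1 : PySem.List.pyGetD (c0 :: c1 :: rest) 1 0 = c1 := by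
    simp [PySem.List.pyGetD_ofNat']
  rw [hget0, hget1]
  rw [min_eq_head hL, min2_eq_second hL]
  have h0 := inner_loop_eq xs c0 hc0mem
  have h1 := inner_loop_eq xs c1 hc1mem
  dsimp only at h0 h1
  have hf0 : (PySem.List.enumerate xs 0).filterMap (fun p => if p.2 = c0 then some p.1 else none) = occAux xs c0 0 := by
    simpa using filterMap_enumerate_eq xs c0 0
  have hf1 : (PySem.List.enumerate xs 0).filterMap (fun p => if p.2 = c1 then some p.1 else none) = occAux xs c1 0 := by
    simpa using filterMap_enumerate_eq xs c1 0
  rw [h0, h1, hf0, hf1]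
  have hnd0 := occAux_nodup xs c0 0
  have hnd1 := occAux_nodup xs c1 0
  rw [PySem.Set.ofList_eq_self_of_nodup _ hnd0, PySem.Set.ofList_eq_self_of_nodup _ hnd1]
  rfl
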